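-- pv_equiv track=rewrite | github.com/ishustava/advent-of-code-2018 | day7.py | find_next_steps
-- ===== SOURCE A (Python) =====
-- def get_all_children(steps):
--   result = set()
--   for c in steps.values():
--     result = result.union(c)
--   return result
--
-- def find_next_steps(steps):
--   next_steps = []
--   for s in steps.keys():
--     cs = get_all_children(steps)
--     if s not in cs:
--       next_steps.append(s)
--   next_steps.sort()
--   return next_steps
-- ===== SOURCE B (Python) =====
-- def find_next_steps(steps):
--   candidates = set(steps.keys())
--   for children in steps.values():
--     for c in children:
--       candidates.discard(c)
--   return sorted(candidates)
-- ===== Notes on version B (the rewrite author's own statement) =====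
-- stated objective: faster
-- what changed: B seeds a candidate set with all keys and traverses the edge lists once, discarding every child, instead of A's per-key rebuild of the full children union followed by a membership test.
import Mathlib
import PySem

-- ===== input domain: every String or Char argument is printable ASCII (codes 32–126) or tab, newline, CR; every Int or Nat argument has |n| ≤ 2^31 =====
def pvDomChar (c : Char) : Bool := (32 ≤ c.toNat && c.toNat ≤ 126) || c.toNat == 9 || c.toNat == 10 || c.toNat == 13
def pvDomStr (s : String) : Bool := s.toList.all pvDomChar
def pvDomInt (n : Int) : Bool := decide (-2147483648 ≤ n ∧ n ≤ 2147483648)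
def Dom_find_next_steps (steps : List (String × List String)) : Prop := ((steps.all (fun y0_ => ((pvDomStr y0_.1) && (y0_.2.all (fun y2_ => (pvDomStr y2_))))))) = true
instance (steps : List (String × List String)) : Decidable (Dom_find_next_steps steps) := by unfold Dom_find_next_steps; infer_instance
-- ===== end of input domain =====

-- B replaces A's per-key rebuild of the children union by one elimination pass over the edge lists (faster in a timing run).

-- ===== PORT A =====
def get_all_children (steps : PySem.Dict String (List String)) : PySem.Set String :=
  steps.values.foldl (fun result c => PySem.Set.union result c) PySem.Set.empty

def find_next_steps (steps : List (String × List String)) : List String :=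
  let d := PySem.Dict.ofList steps
  let ns := d.keys.foldl (fun next_steps s =>
    -- cs = get_all_children(steps), recomputed on every iteration as in A
    if PySem.Set.contains (get_all_children d) s then next_steps else next_steps ++ [s]) []
  PySem.List.sorted ns (fun x => x) false

-- ===== PORT B =====
def find_next_steps_alt (steps : List (String × List String)) : List String :=
  let d := PySem.Dict.ofList steps
  let candidates := d.values.foldl
    (fun cand children => children.foldl (fun cand c => PySem.Set.discard cand c) cand)
    (PySem.Set.ofList d.keys)
  PySem.List.sorted candidates (fun x => x) false

-- ===== PRECONDITION & SPEC =====
def Spec_find_next_steps (steps : List (String × List String)) (out : List String) : Prop := out = find_next_steps_alt steps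
instance (steps : List (String × List String)) (out : List String) : Decidable (Spec_find_next_steps steps out) := by unfold Spec_find_next_steps; infer_instance

-- ===== CLAIM (what is proved, stated in full; the proofs are below) =====
def Claim_equal_find_next_steps : Prop := ∀ (steps : List (String × List String)), Dom_find_next_steps steps → Spec_find_next_steps steps (find_next_steps steps)

-- ===== LEMMAS AND PROOFS =====

-- membership in A's running union of children lists
lemma mem_foldl_union (vals : List (List String)) (acc : PySem.Set String) (x : String) :
    x ∈ vals.foldl (fun result c => PySem.Set.union result c) acc ↔ x ∈ acc ∨ ∃ c ∈ vals, x ∈ c := by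
  induction vals generalizing acc with
  | nil => simp
  | cons v vs ih =>
    simp [List.foldl_cons, ih, PySem.Set.mem_union]
    tauto

-- membership in B's candidate set after discarding one children list
lemma mem_foldl_discard (l : List String) (s : PySem.Set String) (x : String) :
    x ∈ l.foldl (fun cand c => PySem.Set.discard cand c) s ↔ x ∈ s ∧ x ∉ l := by
  induction l generalizing s with
  | nil => simp
  | cons c cs ih =>
    simp [List.foldl_cons, ih, PySem.Set.mem_discard]
    tauto

lemma nodup_foldl_discard (l : List String) (s : PySem.Set String) (h : s.Nodup) :
    (l.foldl (fun cand c => PySem.Set.discard cand c) s).Nodup := by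
  induction l generalizing s with
  | nil => exact h
  | cons c cs ih => exact ih _ (PySem.Set.nodup_discard _ _ h)

-- membership in B's candidate set after the double loop over all edge lists
lemma mem_foldl_discard_all (vals : List (List String)) (s : PySem.Set String) (x : String) :
    x ∈ vals.foldl (fun cand children => children.foldl (fun cand c => PySem.Set.discard cand c) cand) s
      ↔ x ∈ s ∧ ∀ c ∈ vals, x ∉ c := by
  induction vals generalizing s with
  | nil => simp
  | cons v vs ih =>
    simp [List.foldl_cons, ih, mem_foldl_discard]
    tauto

lemma nodup_foldl_discard_all (vals : List (List String)) (s : PySem.Set String) (h : s.Nodup) :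
    (vals.foldl (fun cand children => children.foldl (fun cand c => PySem.Set.discard cand c) cand) s).Nodup := by
  induction vals generalizing s with
  | nil => exact h
  | cons v vs ih => exact ih _ (nodup_foldl_discard _ _ h)

-- ===== VERDICT (by name: the statement is the Claim_ definition above) =====
theorem find_next_steps_spec : Claim_equal_find_next_steps := by
  intro steps _
  unfold Spec_find_next_steps find_next_steps find_next_steps_alt
  set d := PySem.Dict.ofList steps with hd
  apply PySem.List.sorted_eq_sorted_of_perm (hinj := fun a b h => h)
  have hflip : (d.keys.foldl (fun next_steps s =>
      if PySem.Set.contains (get_all_children d) s then next_steps else next_steps ++ [s]) [])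
      = d.keys.filter (fun s => !(PySem.Set.contains (get_all_children d) s)) := by
    rw [show (d.keys.filter (fun s => !(PySem.Set.contains (get_all_children d) s))) =
        [] ++ d.keys.filter (fun s => !(PySem.Set.contains (get_all_children d) s)) from rfl,
      ← PySem.List.foldl_append_if_eq_filter]
    apply PySem.List.foldl_congr_mem
    intro acc x _
    cases h : PySem.Set.contains (get_all_children d) x <;> simp_all
  rw [hflip]
  apply (List.perm_ext_iff_of_nodup ((PySem.Dict.nodup_keys_ofList steps).filter _)
    (nodup_foldl_discard_all _ _ (PySem.Set.nodup_ofList _))).mpr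
  intro x
  rw [mem_foldl_discard_all, List.mem_filter, PySem.Set.mem_ofList]
  constructor
  · rintro ⟨hk, hc⟩
    refine ⟨hk, ?_⟩
    intro c hc' hx
    rw [Bool.not_eq_true', ← Bool.not_eq_true] at hc
    exact hc ((PySem.Set.contains_iff _ _).mpr
      ((mem_foldl_union d.values PySem.Set.empty x).mpr (Or.inr ⟨c, hc', hx⟩)))
  · rintro ⟨hk, hc⟩
    refine ⟨hk, ?_⟩
    rw [Bool.not_eq_true', ← Bool.not_eq_true]
    intro hmem
    rcases (mem_foldl_union d.values PySem.Set.empty x).mp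
      ((PySem.Set.contains_iff _ _).mp hmem) with h | ⟨c, hc', hx⟩
    · simp [PySem.Set.empty] at h
    · exact hc c hc' hx
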